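-- pv_equiv track=rewrite | github.com/n1kpavlov/RTU_MIREA_software_engineering | 4_semester/Программирование на языке Питон/pract_5/main.py | decode_val
-- ===== SOURCE A (Python) =====
-- def decode_val(bits):
--     decoded_bits = []
--     for i in range(0, len(bits), 3):
--         triplet = bits[i:i+3]
--         if len(triplet) == 3:
--             if triplet.count('1') > triplet.count('0'):
--                 decoded_bits.append('1')
--             else:
--                 decoded_bits.append('0')
--     return ''.join(decoded_bits)
-- ===== SOURCE B (Python) =====
-- def decode_val(bits):
--     out = []
--     score = 0
--     phase = 0
--     for ch in bits:
--         score += (ch == '1') - (ch == '0')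
--         phase += 1
--         if phase == 3:
--             out.append('1' if score > 0 else '0')
--             score = 0
--             phase = 0
--     return ''.join(out)
-- ===== Notes on version B (the rewrite author's own statement) =====
-- stated objective: alternative
-- what changed: B replaces A's index-stepped slicing with two substring .count() scans per group by a single character-by-character streaming state machine that keeps a running score (+1 for '1', -1 for '0') and a phase counter mod 3, emitting one output bit whenever a group of three completes; an incomplete trailing group leaves phase < 3 and so emits nothing, matching A's drop of a short final slice.
import Mathlib
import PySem

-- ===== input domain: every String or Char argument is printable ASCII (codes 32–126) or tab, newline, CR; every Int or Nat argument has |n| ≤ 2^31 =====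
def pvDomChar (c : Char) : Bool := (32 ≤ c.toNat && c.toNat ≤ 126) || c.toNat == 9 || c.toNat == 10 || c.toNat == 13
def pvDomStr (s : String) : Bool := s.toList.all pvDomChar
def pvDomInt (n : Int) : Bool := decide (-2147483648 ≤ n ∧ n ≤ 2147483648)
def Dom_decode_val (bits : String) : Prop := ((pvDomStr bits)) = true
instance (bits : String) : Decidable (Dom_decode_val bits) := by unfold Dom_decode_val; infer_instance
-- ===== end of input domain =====

-- B replaces A's index-stepped slicing + substring .count() scans by a single character-by-character
-- streaming state machine (running score, phase counter mod 3); an alternative decomposition, same output.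

-- ===== PORT A =====
-- the body of A's loop, as a named function
def aBody (bits : String) (acc : List String) (i : Int) : List String :=
  let triplet := PySem.Str.slice bits (some i) (some (i + 3))
  if PySem.Str.len triplet = 3 then
    if PySem.Str.count triplet "1" > PySem.Str.count triplet "0" then acc ++ ["1"]
    else acc ++ ["0"]
  else acc

def decode_val (bits : String) : String :=
  PySem.Str.join ""
    ((PySem.List.pyRange 0 (PySem.Str.len bits) 3).foldl (aBody bits) ([] : List String))

-- ===== PORT B =====
-- one step of B's loop: update score and phase, emit a bit when the phase counter reaches 3
def bStep (st : List String × Int × Nat) (ch : Char) : List String × Int × Nat :=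
  let out := st.1
  let score := st.2.1 + ((if ch = '1' then 1 else 0) - (if ch = '0' then 1 else 0))
  let phase := st.2.2 + 1
  if phase = 3 then (out ++ [if score > 0 then "1" else "0"], 0, 0)
  else (out, score, phase)

def decode_val_alt (bits : String) : String :=
  PySem.Str.join "" (bits.toList.foldl bStep (([] : List String), (0 : Int), (0 : Nat))).1

-- ===== PRECONDITION & SPEC =====
def Spec_decode_val (bits : String) (out : String) : Prop := out = decode_val_alt bits
instance (bits : String) (out : String) : Decidable (Spec_decode_val bits out) := by unfold Spec_decode_val; infer_instance

-- ===== CLAIM (what is proved, stated in full; the proofs are below) =====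
def Claim_equal_decode_val : Prop := ∀ (bits : String), Dom_decode_val bits → Spec_decode_val bits (decode_val bits)

-- ===== LEMMAS AND PROOFS =====

-- proof-only reference function: the majority bit of each complete group of three
def decodeTriples : List Char → List Char
  | a :: b :: c :: rest =>
      (if ((if a = '1' then 1 else 0) + (if b = '1' then 1 else 0) + (if c = '1' then 1 else 0) : Nat)
          > ((if a = '0' then 1 else 0) + (if b = '0' then 1 else 0) + (if c = '0' then 1 else 0) : Nat)
       then '1' else '0') :: decodeTriples rest
  | _ => []

lemma go_succ (c h : Char) (t : List Char) (n acc : Nat) :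
    PySem.Chars.count.go [c] (n+1) (h :: t) acc
      = if h = c then PySem.Chars.count.go [c] n t (acc+1) else PySem.Chars.count.go [c] n t acc := by
  rw [PySem.Chars.count.go]
  simp [List.isPrefixOf]
  split_ifs <;> simp_all

lemma go_count (c : Char) : ∀ (s : List Char) (n acc : Nat), s.length ≤ n →
    PySem.Chars.count.go [c] n s acc = acc + s.count c := by
  intro s
  induction s with
  | nil => intro n acc _; cases n <;> simp [PySem.Chars.count.go]
  | cons h t ih =>
    intro n acc hn
    cases n with
    | zero => simp at hn
    | succ m =>
      rw [go_succ]
      simp at hn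
      by_cases hc : h = c <;> simp [hc, ih _ _ hn]
      omega

lemma count_singleton (s : List Char) (c : Char) :
    PySem.Chars.count s [c] = s.count c := by
  simp [PySem.Chars.count, go_count c s s.length 0 le_rfl]

lemma pyRange3_nil (a b : Int) (h : b ≤ a) : PySem.List.pyRange a b 3 = [] := by
  rw [PySem.List.pyRange_of_pos a b (by norm_num)]
  rw [if_neg (by omega)]
  simp

lemma pyRange3_cons (a b : Int) (h : a < b) :
    PySem.List.pyRange a b 3 = a :: PySem.List.pyRange (a+3) b 3 := by
  rw [PySem.List.pyRange_of_pos a b (by norm_num), PySem.List.pyRange_of_pos (a+3) b (by norm_num)]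
  have hc : (if a < b then ((b - a + 3 - 1) / 3).toNat else 0)
      = (if a + 3 < b then ((b - (a+3) + 3 - 1) / 3).toNat else 0) + 1 := by
    split_ifs <;> omega
  rw [hc, List.range_succ_eq_map, List.map_cons, List.map_map]
  congr 1
  · push_cast; ring
  apply List.map_congr_left
  intro k _
  simp only [Function.comp_apply]
  push_cast
  ring

lemma slice_nat (bits : String) (i : Nat) :
    (PySem.Str.slice bits (some (i : Int)) (some ((i : Int) + 3))).toList
      = (bits.toList.drop i).take 3 := by
  have h3 : ((i : Int) + 3) = ((i : Int) + ((3 : Nat) : Int)) := by norm_num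
  simp [PySem.Str.slice, PySem.Chars.slice, h3, PySem.List.slice_natCast_add]

lemma count_toList (s : String) (c : Char) :
    PySem.Str.count s (String.ofList [c]) = s.toList.count c := by
  have : (String.ofList [c]).toList = [c] := by simp
  simp [PySem.Str.count, this, count_singleton]

lemma loopA (bits : String) : ∀ (k i : Nat) (acc : List String),
    bits.toList.length ≤ i + k →
    (PySem.List.pyRange (i : Int) (bits.toList.length : Int) 3).foldl (aBody bits) acc
      = acc ++ (decodeTriples (bits.toList.drop i)).map (fun c => String.ofList [c]) := by
  intro k
  induction k with
  | zero =>
    intro i acc h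
    rw [pyRange3_nil _ _ (by exact_mod_cast by omega)]
    rw [List.drop_eq_nil_of_le (by omega)]
    simp [decodeTriples]
  | succ m ih =>
    intro i acc h
    by_cases hib : (i : Int) < (bits.toList.length : Int)
    · have hib' : i < bits.toList.length := by exact_mod_cast hib
      rw [pyRange3_cons _ _ hib, List.foldl_cons]
      have hcast : ((i : Int) + 3) = (((i + 3 : Nat) : Int)) := by push_cast; ring
      have hrec := ih (i + 3) (aBody bits acc (i : Int)) (by omega)
      rw [hcast, hrec]
      -- evaluate the body
      simp only [aBody]
      have hsl := slice_nat bits i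
      have hlen : PySem.Str.len (PySem.Str.slice bits (some (i:Int)) (some ((i:Int) + 3)))
          = (((bits.toList.drop i).take 3).length : Int) := by
        rw [PySem.Str.len, hsl]
      match hdrop : bits.toList.drop i with
      | a :: b :: c :: rest =>
        have htrip : (PySem.Str.slice bits (some (i:Int)) (some ((i:Int) + 3))).toList
            = [a, b, c] := by rw [hsl, hdrop]; rfl
        rw [hlen, hdrop]
        have hc1 : PySem.Str.count (PySem.Str.slice bits (some (i:Int)) (some ((i:Int) + 3))) "1"
            = [a, b, c].count '1' := by
          have := count_toList (PySem.Str.slice bits (some (i:Int)) (some ((i:Int) + 3))) '1'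
          simpa [htrip] using this
        have hc0 : PySem.Str.count (PySem.Str.slice bits (some (i:Int)) (some ((i:Int) + 3))) "0"
            = [a, b, c].count '0' := by
          have := count_toList (PySem.Str.slice bits (some (i:Int)) (some ((i:Int) + 3))) '0'
          simpa [htrip] using this
        have hrest : bits.toList.drop (i + 3) = rest := by
          have h2 := congrArg (List.drop 3) hdrop
          rw [List.drop_drop] at h2
          simpa [show 3 + i = i + 3 by ring] using h2
        rw [hrest, decodeTriples]
        rw [if_pos (by norm_num [List.take]), hc1, hc0]
        have hcnt1 : [a, b, c].count '1'
            = (if a = '1' then 1 else 0) + (if b = '1' then 1 else 0) + (if c = '1' then 1 else 0) := by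
          simp [List.count_cons]
          split_ifs <;> simp_all
        have hcnt0 : [a, b, c].count '0'
            = (if a = '0' then 1 else 0) + (if b = '0' then 1 else 0) + (if c = '0' then 1 else 0) := by
          simp [List.count_cons]
          split_ifs <;> simp_all
        rw [hcnt1, hcnt0]
        by_cases hmaj : (if a = '1' then 1 else 0) + (if b = '1' then 1 else 0) + (if c = '1' then 1 else 0)
            > (if a = '0' then 1 else 0) + (if b = '0' then 1 else 0) + (if c = '0' then 1 else 0)
        · rw [if_pos hmaj, if_pos hmaj]
          simp [show String.ofList ['1'] = "1" from by decide]
        · rw [if_neg hmaj, if_neg hmaj]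
          simp [show String.ofList ['0'] = "0" from by decide]
      | [a, b] =>
        have hshort : bits.toList.length = i + 2 := by
          have h2 : (bits.toList.drop i).length = 2 := by rw [hdrop]; rfl
          rw [List.length_drop] at h2; omega
        rw [hlen, hdrop]
        rw [if_neg (by norm_num [List.take])]
        rw [List.drop_eq_nil_of_le (by omega)]
        rfl
      | [a] =>
        have hshort : bits.toList.length = i + 1 := by
          have h2 : (bits.toList.drop i).length = 1 := by rw [hdrop]; rfl
          rw [List.length_drop] at h2; omega
        rw [hlen, hdrop]
        rw [if_neg (by norm_num [List.take])]
        rw [List.drop_eq_nil_of_le (by omega)]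
        rfl
      | [] =>
        exfalso
        have h2 : (bits.toList.drop i).length = 0 := by rw [hdrop]; rfl
        rw [List.length_drop] at h2; omega
    · have : bits.toList.length ≤ i := by exact_mod_cast by omega
      rw [pyRange3_nil _ _ (by exact_mod_cast by omega)]
      rw [List.drop_eq_nil_of_le this]
      simp [decodeTriples]

-- B's streaming fold, started at a fresh group boundary, produces exactly the majority bits
lemma loopB_fuel : ∀ (n : Nat) (s : List Char), s.length ≤ n → ∀ out : List String,
    (s.foldl bStep (out, (0 : Int), (0 : Nat))).1
      = out ++ (decodeTriples s).map (fun c => String.ofList [c]) := by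
  intro n
  induction n with
  | zero =>
    intro s hs out
    match s, hs with
    | [], _ => simp [decodeTriples]
  | succ m ih =>
    intro s hs out
    match s with
    | [] => simp [decodeTriples]
    | [a] => simp [decodeTriples, bStep]
    | [a, b] => simp [decodeTriples, bStep]
    | a :: b :: c :: rest =>
      have hstep : bStep (bStep (bStep (out, (0:Int), (0:Nat)) a) b) c
          = (out ++ [if (0 + ((if a = '1' then (1:Int) else 0) - (if a = '0' then 1 else 0))
                        + ((if b = '1' then (1:Int) else 0) - (if b = '0' then 1 else 0))
                        + ((if c = '1' then (1:Int) else 0) - (if c = '0' then 1 else 0))) > 0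
                     then "1" else "0"], 0, 0) := by
        simp [bStep]
      have hrestlen : rest.length ≤ m := by simp at hs; omega
      rw [List.foldl_cons, List.foldl_cons, List.foldl_cons, hstep, ih rest hrestlen, decodeTriples]
      by_cases hmaj : ((if a = '1' then 1 else 0) + (if b = '1' then 1 else 0) + (if c = '1' then 1 else 0) : Nat)
          > ((if a = '0' then 1 else 0) + (if b = '0' then 1 else 0) + (if c = '0' then 1 else 0) : Nat)
      · have hsc : (0 + ((if a = '1' then (1:Int) else 0) - (if a = '0' then 1 else 0))
                      + ((if b = '1' then (1:Int) else 0) - (if b = '0' then 1 else 0))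
                      + ((if c = '1' then (1:Int) else 0) - (if c = '0' then 1 else 0))) > 0 := by
          split_ifs at hmaj ⊢ <;> omega
        rw [if_pos hsc, if_pos hmaj]
        simp [show String.ofList ['1'] = "1" from by decide]
      · have hsc : ¬ (0 + ((if a = '1' then (1:Int) else 0) - (if a = '0' then 1 else 0))
                      + ((if b = '1' then (1:Int) else 0) - (if b = '0' then 1 else 0))
                      + ((if c = '1' then (1:Int) else 0) - (if c = '0' then 1 else 0))) > 0 := by
          split_ifs at hmaj ⊢ <;> omega
        rw [if_neg hsc, if_neg hmaj]
        simp [show String.ofList ['0'] = "0" from by decide]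

lemma loopB (s : List Char) (out : List String) :
    (s.foldl bStep (out, (0 : Int), (0 : Nat))).1
      = out ++ (decodeTriples s).map (fun c => String.ofList [c]) :=
  loopB_fuel s.length s le_rfl out

-- ===== VERDICT (by name: the statement is the Claim_ definition above) =====
theorem decode_val_spec : Claim_equal_decode_val := by
  intro bits _
  unfold Spec_decode_val decode_val decode_val_alt
  have h0 : PySem.Str.len bits = ((bits.toList.length : Nat) : Int) := rfl
  have hA := loopA bits bits.toList.length 0 [] (by omega)
  rw [h0]
  simp only [Nat.cast_zero] at hA
  rw [hA, List.drop_zero, List.nil_append, loopB, List.nil_append]
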